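-- pv_equiv track=rewrite | github.com/dskrypa/music_manager | lib/music/common/ratings.py | stars_from_256
-- ===== SOURCE A (Python) =====
-- from typing import Optional, Union
--
-- RATING_RANGES = [(1, 31, 15), (32, 95, 64), (96, 159, 128), (160, 223, 196), (224, 255, 255)]
--
-- def stars_from_256(rating: int, out_of: int = 5) -> Optional[int]:
--     if not (0 <= rating <= 255):
--         raise ValueError(f'{rating=} is outside the range of 0-255')
--     elif out_of == 256:
--         return int(rating)
--     elif out_of not in (5, 10):
--         raise ValueError(f'{out_of=} is invalid - must be 5, 10, or 256')
--     elif rating == 0: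
--         return None
--
--     for stars_5, (a, b, c) in enumerate(RATING_RANGES, 1):
--         if a <= rating <= b:
--             if out_of == 5:
--                 return stars_5
--             a, b, c = RATING_RANGES[stars_5 - 1]
--             if stars_5 == 1 and rating < c:
--                 return 1
--             stars_10 = stars_5 * 2
--             return stars_10 + 1 if rating > c else stars_10
-- ===== SOURCE B (Python) =====
-- from typing import Optional
--
-- _THRESHOLDS = {5: (31, 95, 159, 223, 255), 10: (14, 15, 31, 64, 95, 128, 159, 196, 223, 255)}
--
-- def stars_from_256(rating: int, out_of: int = 5) -> Optional[int]:
--     if not (0 <= rating <= 255):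
--         raise ValueError(f'{rating=} is outside the range of 0-255')
--     if out_of == 256:
--         return int(rating)
--     try:
--         thresholds = _THRESHOLDS[out_of]
--     except KeyError:
--         raise ValueError(f'{out_of=} is invalid - must be 5, 10, or 256')
--     if rating == 0:
--         return None
--     return 1 + sum(1 for t in thresholds if t < rating)
-- ===== Notes on version B (the rewrite author's own statement) =====
-- stated objective: simpler
-- what changed: Replaced the enumerate-loop over (low,high,midpoint) ranges and its nested 10-star midpoint/special-case logic with a precomputed threshold table per scale and a single count of thresholds below the rating.
import Mathlib
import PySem

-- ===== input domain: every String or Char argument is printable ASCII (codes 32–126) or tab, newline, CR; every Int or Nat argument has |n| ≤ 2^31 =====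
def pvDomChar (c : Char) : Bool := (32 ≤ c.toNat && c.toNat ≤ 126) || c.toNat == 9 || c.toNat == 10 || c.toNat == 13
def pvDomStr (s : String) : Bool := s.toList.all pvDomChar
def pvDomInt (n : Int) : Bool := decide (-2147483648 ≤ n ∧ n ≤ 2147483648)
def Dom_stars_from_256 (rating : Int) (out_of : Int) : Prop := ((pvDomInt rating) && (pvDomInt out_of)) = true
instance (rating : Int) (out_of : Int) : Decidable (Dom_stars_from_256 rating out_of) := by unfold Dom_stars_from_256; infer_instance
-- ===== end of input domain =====

-- B replaces A's enumerate-loop over (lo,hi,mid) ranges and its nested 10-star midpoint logic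
-- with a single count of passed thresholds over a precomputed per-scale table (objective: simpler).


-- ===== PORT A =====
def RATING_RANGES : List (Int × Int × Int) :=
  [(1, 31, 15), (32, 95, 64), (96, 159, 128), (160, 223, 196), (224, 255, 255)]

-- the 'for stars_5, (a, b, c) in enumerate(RATING_RANGES, 1)' loop, step for step
def starsLoop (rating : Int) (out_of : Int) (stars_5 : Int) : List (Int × Int × Int) → Option Int
  | [] => none                         -- loop falls through: implicit None
  | (a, b, _c) :: rest =>
      if a ≤ rating ∧ rating ≤ b then
        if out_of = 5 then some stars_5
        else
          -- a, b, c = RATING_RANGES[stars_5 - 1]  (would raise on bad index → none, unreachable)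
          match PySem.List.pyGet? RATING_RANGES (stars_5 - 1) with
          | none => none
          | some (_, _, c) =>
              if stars_5 = 1 ∧ rating < c then some 1
              else
                let stars_10 := stars_5 * 2
                if rating > c then some (stars_10 + 1) else some stars_10
      else starsLoop rating out_of (stars_5 + 1) rest

def stars_from_256 (rating : Int) (out_of : Int) : Option Int :=
  if ¬(0 ≤ rating ∧ rating ≤ 255) then none        -- Python raises ValueError (excluded by Pre_)
  else if out_of = 256 then some rating
  else if ¬(out_of = 5 ∨ out_of = 10) then none    -- Python raises ValueError (excluded by Pre_)
  else if rating = 0 then none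
  else starsLoop rating out_of 1 RATING_RANGES

-- ===== PORT B =====
def thresholds5 : List Int := [31, 95, 159, 223, 255]
def thresholds10 : List Int := [14, 15, 31, 64, 95, 128, 159, 196, 223, 255]

def stars_from_256_alt (rating : Int) (out_of : Int) : Option Int :=
  if ¬(0 ≤ rating ∧ rating ≤ 255) then none        -- Python raises ValueError (excluded by Pre_)
  else if out_of = 256 then some rating
  else if ¬(out_of = 5 ∨ out_of = 10) then none    -- Python raises ValueError (excluded by Pre_)
  else if rating = 0 then none
  else
    let thresholds := if out_of = 5 then thresholds5 else thresholds10
    -- 1 + sum(1 for t in thresholds if t < rating)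
    some (1 + thresholds.foldl (fun acc t => if t < rating then acc + 1 else acc) 0)

-- ===== PRECONDITION & SPEC =====
-- Pre_ excludes exactly the inputs on which the Python A raises ValueError.
def Pre_stars_from_256 (rating : Int) (out_of : Int) : Prop :=
  (0 ≤ rating ∧ rating ≤ 255) ∧ (out_of = 5 ∨ out_of = 10 ∨ out_of = 256)
instance (rating : Int) (out_of : Int) : Decidable (Pre_stars_from_256 rating out_of) := by
  unfold Pre_stars_from_256; infer_instance

def pvWitness_stars_from_256 : Int × Int := (100, 10)

def Spec_stars_from_256 (rating : Int) (out_of : Int) (out : Option Int) : Prop := out = stars_from_256_alt rating out_of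
instance (rating : Int) (out_of : Int) (out : Option Int) : Decidable (Spec_stars_from_256 rating out_of out) := by unfold Spec_stars_from_256; infer_instance

-- ===== CLAIM (what is proved, stated in full; the proofs are below) =====
def Claim_equal_stars_from_256 : Prop := ∀ (rating : Int) (out_of : Int), Dom_stars_from_256 rating out_of → Pre_stars_from_256 rating out_of → Spec_stars_from_256 rating out_of (stars_from_256 rating out_of)

-- ===== LEMMAS AND PROOFS =====
lemma agree_in_range (rating : Int) (h0 : 0 ≤ rating) (h1 : rating ≤ 255)
    (out_of : Int) (ho : out_of = 5 ∨ out_of = 10) :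
    stars_from_256 rating out_of = stars_from_256_alt rating out_of := by
  rcases ho with ho | ho <;> subst ho <;>
    · interval_cases rating <;> decide

-- ===== VERDICT (by name: the statement is the Claim_ definition above) =====
theorem stars_from_256_spec : Claim_equal_stars_from_256 := by
  intro rating out_of _ hpre
  obtain ⟨⟨h0, h1⟩, ho⟩ := hpre
  unfold Spec_stars_from_256
  rcases ho with ho | ho | ho
  · exact agree_in_range rating h0 h1 out_of (Or.inl ho)
  · exact agree_in_range rating h0 h1 out_of (Or.inr ho)
  · subst ho
    simp [stars_from_256, stars_from_256_alt, h0, h1]
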